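-- pv_equiv track=rewrite | github.com/Kiran-616/Kiran | Assignment 8/11. Function.py | sum_of_digit_powers
-- ===== SOURCE A (Python) =====
-- def count_digits(num):
--     count = 0
--     while num > 0:
--         count += 1
--         num = num // 10
--     return count
--
-- def power (base, exp):
--     result = 1
--
--     for _ in range (exp):
--         result = 1
--         for _ in range(exp):
--             result= 1
--             for _ in range(exp):
--                 result = 1
--                 for _ in range (exp):
--                     result *= base
--                 return result
--
-- def sum_of_digit_powers(num):
--     n = count_digits(num)
--     total = 0
--     temp = num
--     while temp > 0:
--         digit = temp % 10
--         total += power (digit, n)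
--         temp = temp // 10
--     return total
-- ===== SOURCE B (Python) =====
-- def sum_of_digit_powers(num):
--     if num <= 0:
--         return 0
--     s = str(num)
--     n = len(s)
--     return sum(int(d) ** n for d in s)
-- ===== Notes on version B (the rewrite author's own statement) =====
-- stated objective: simpler
-- what changed: B converts the number to its decimal string once and sums int(d)**len(s) with the built-in power, instead of A's %10 // 10 digit-peeling loop plus a separate digit-count loop and a hand-rolled quadruply-nested power loop.
import Mathlib
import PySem

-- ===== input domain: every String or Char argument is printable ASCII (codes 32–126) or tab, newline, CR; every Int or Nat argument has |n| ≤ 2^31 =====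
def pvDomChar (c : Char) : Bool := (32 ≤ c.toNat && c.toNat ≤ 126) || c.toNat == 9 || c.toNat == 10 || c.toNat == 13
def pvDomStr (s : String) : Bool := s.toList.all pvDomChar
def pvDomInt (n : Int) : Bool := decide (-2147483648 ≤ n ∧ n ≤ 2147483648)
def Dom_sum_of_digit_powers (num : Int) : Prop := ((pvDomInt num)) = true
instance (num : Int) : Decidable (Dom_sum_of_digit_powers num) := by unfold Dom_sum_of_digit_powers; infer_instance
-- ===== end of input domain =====

-- B replaces A's %10-//10 digit peeling, separate digit-count loop and quadruply-nested
-- hand-rolled power loop by one pass over str(num) with the built-in power (simpler; same result).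

-- ===== PORT A =====

-- termination helper for the two while-loops: num // 10 shrinks while num > 0
theorem pvDiv10_lt (num : Int) (h : 0 < num) :
    (PySem.Int.floordiv num 10).toNat < num.toNat := by
  rw [PySem.Int.floordiv_eq_ediv_of_pos (by norm_num)]
  omega

-- while num > 0: count += 1; num = num // 10
def pvCountLoop (count num : Int) : Int :=
  if h : 0 < num then pvCountLoop (count + 1) (PySem.Int.floordiv num 10) else count
termination_by num.toNat
decreasing_by exact pvDiv10_lt num h

-- A's 'power': all four nested loops run over range(exp); if that range is empty every loop
-- body is skipped and the function falls through returning None; otherwise the first pass of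
-- the three outer levels reaches the innermost loop (result *= base, exp times) and the
-- 'return' inside the third level fires with that value.
def pvPower (base exp : Int) : Option Int :=
  if PySem.List.pyRange 0 exp 1 = [] then none
  else some ((PySem.List.pyRange 0 exp 1).foldl (fun r _ => r * base) 1)

-- while temp > 0: digit = temp % 10; total += power(digit, n); temp = temp // 10
-- (.getD 0 is unreachable: whenever the body runs, n = count_digits num ≥ 1, so pvPower is some)
def pvSumLoop (n total temp : Int) : Int :=
  if h : 0 < temp then
    pvSumLoop n (total + (pvPower (PySem.Int.mod temp 10) n).getD 0) (PySem.Int.floordiv temp 10)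
  else total
termination_by temp.toNat
decreasing_by exact pvDiv10_lt temp h

def sum_of_digit_powers (num : Int) : Int :=
  pvSumLoop (pvCountLoop 0 num) 0 num

-- ===== PORT B =====
def sum_of_digit_powers_alt (num : Int) : Int :=
  if num ≤ 0 then 0
  else
    let s := PySem.Int.toChars num        -- s = str(num)
    let n := s.length                     -- n = len(s)
    (s.map (fun d => ((PySem.Int.ofChars? [d]).getD 0) ^ n)).sum   -- sum(int(d)**n for d in s)

-- ===== PRECONDITION & SPEC =====
def Spec_sum_of_digit_powers (num : Int) (out : Int) : Prop := out = sum_of_digit_powers_alt num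
instance (num : Int) (out : Int) : Decidable (Spec_sum_of_digit_powers num out) := by unfold Spec_sum_of_digit_powers; infer_instance

-- ===== CLAIM (what is proved, stated in full; the proofs are below) =====
def Claim_equal_sum_of_digit_powers : Prop := ∀ (num : Int), Dom_sum_of_digit_powers num → Spec_sum_of_digit_powers num (sum_of_digit_powers num)

-- ===== LEMMAS AND PROOFS =====

-- A's digit count is the number of decimal digits
theorem pvCountLoop_eq (m : Nat) : ∀ c : Int,
    pvCountLoop c (m : Int) = c + ((Nat.digits 10 m).length : Int) := by
  induction m using Nat.strong_induction_on with
  | _ m ih =>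
    intro c
    rw [pvCountLoop]
    by_cases hm : 0 < m
    · have h10 : PySem.Int.floordiv (m : Int) 10 = ((m / 10 : Nat) : Int) := by
        exact_mod_cast PySem.Int.floordiv_natCast m 10
      rw [dif_pos (by exact_mod_cast hm), h10, ih (m / 10) (Nat.div_lt_self hm (by norm_num)),
        Nat.digits_def' (by norm_num : 1 < 10) hm]
      simp; omega
    · have hm0 : m = 0 := by omega
      subst hm0; simp [Nat.digits]

theorem pvFoldl_mul_const {α : Type} (b : Int) (l : List α) : ∀ a : Int,
    l.foldl (fun r _ => r * b) a = a * b ^ l.length := by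
  induction l with
  | nil => intro a; simp
  | cons x xs ih => intro a; simp [ih, pow_succ]; ring

theorem pvPower_of_pos (b : Int) (n : Nat) (hn : 0 < n) :
    (pvPower b (n : Int)).getD 0 = b ^ n := by
  have hne : PySem.List.pyRange 0 (n : Int) 1 ≠ [] := by
    intro h
    have := PySem.List.length_pyRange_one 0 (n : Int)
    rw [h] at this; simp at this; omega
  have hlen : (PySem.List.pyRange 0 (n : Int) 1).length = n := by
    rw [PySem.List.length_pyRange_one]; simp
  simp only [pvPower, if_neg hne, Option.getD_some, pvFoldl_mul_const, hlen, one_mul]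

theorem pvSumLoop_eq (n : Nat) (hn : 0 < n) (m : Nat) : ∀ total : Int,
    pvSumLoop (n : Int) total (m : Int)
      = total + ((Nat.digits 10 m).map (fun d : Nat => (d : Int) ^ n)).sum := by
  induction m using Nat.strong_induction_on with
  | _ m ih =>
    intro total
    rw [pvSumLoop]
    by_cases hm : 0 < m
    · have h10 : PySem.Int.floordiv (m : Int) 10 = ((m / 10 : Nat) : Int) := by
        exact_mod_cast PySem.Int.floordiv_natCast m 10
      have hmod : PySem.Int.mod (m : Int) 10 = ((m % 10 : Nat) : Int) := by
        exact_mod_cast PySem.Int.mod_natCast m 10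
      rw [dif_pos (by exact_mod_cast hm), hmod, h10, pvPower_of_pos _ _ hn,
        ih (m / 10) (Nat.div_lt_self hm (by norm_num)),
        Nat.digits_def' (by norm_num : 1 < 10) hm]
      simp; ring
    · have hm0 : m = 0 := by omega
      subst hm0; simp [Nat.digits]

-- str(m) for m > 0 is the decimal digits, most significant first
theorem pvToDigitsCore_eq : ∀ (fuel m : Nat) (acc : List Char), m < fuel → 0 < m →
    Nat.toDigitsCore 10 fuel m acc = ((Nat.digits 10 m).map Nat.digitChar).reverse ++ acc := by
  intro fuel
  induction fuel with
  | zero => intro m acc h; omega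
  | succ f ih =>
    intro m acc hlt hpos
    rw [Nat.toDigitsCore]
    rw [Nat.digits_def' (by norm_num : 1 < 10) hpos]
    by_cases hq : m / 10 = 0
    · simp [hq, Nat.digits]
    · rw [if_neg hq, ih (m / 10) _ (by have := Nat.div_lt_self hpos (by norm_num : 1 < 10); omega)
        (Nat.pos_of_ne_zero hq)]
      simp [List.append_assoc]

theorem pvDigitVal (d : Nat) (hd : d < 10) :
    (PySem.Int.ofChars? [Nat.digitChar d]).getD 0 = (d : Int) := by
  interval_cases d <;> decide

-- ===== VERDICT (by name: the statement is the Claim_ definition above) =====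
theorem sum_of_digit_powers_spec : Claim_equal_sum_of_digit_powers := by
  intro num _
  unfold Spec_sum_of_digit_powers sum_of_digit_powers sum_of_digit_powers_alt
  by_cases hle : num ≤ 0
  · rw [pvSumLoop, dif_neg (by omega), if_pos hle]
  · -- num > 0
    have hpos : 0 < num := by omega
    set m : Nat := num.toNat with hm
    have hnum : num = (m : Int) := by omega
    have hmpos : 0 < m := by omega
    rw [if_neg hle, hnum]
    have hchars : PySem.Int.toChars (m : Int) = ((Nat.digits 10 m).map Nat.digitChar).reverse := by
      simp only [PySem.Int.toChars, Int.toNat_natCast, Nat.toDigits]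
      rw [if_neg (by omega : ¬ ((m : Int) < 0)),
        pvToDigitsCore_eq (m + 1) m [] (by omega) hmpos, List.append_nil]
    set L : Nat := (Nat.digits 10 m).length with hL
    have hLpos : 0 < L := by
      rw [hL]
      have : Nat.digits 10 m ≠ [] := Nat.digits_ne_nil_iff_ne_zero.mpr (by omega)
      exact List.length_pos_iff.mpr this
    have hcount : pvCountLoop 0 (m : Int) = (L : Int) := by
      rw [pvCountLoop_eq, hL]; simp
    rw [hcount, pvSumLoop_eq L hLpos m 0]
    simp only [hchars, List.length_reverse, List.length_map, ← hL, List.map_reverse,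
      List.sum_reverse, List.map_map, zero_add]
    congr 1
    apply List.map_congr_left
    intro d hdmem
    simp [Function.comp, pvDigitVal d (Nat.digits_lt_base (by norm_num) hdmem)]
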